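-- pv_equiv track=rewrite | github.com/onakasuitacity/compro_python_library | 0_library/chinese_remainder_theorem.py | garner
-- ===== SOURCE A (Python) =====
-- def modinv(a, m):
--     b, u, v = m, 1, 0
--     while b:
--         a, b, u, v = b, a - a // b * b, v, u - a // b * v
--     return u % m
--
-- def garner(B, M):
--     T = []
--     for b, m in zip(B, M):
--         x, c = 0, 1
--         for t, _m in zip(T[::-1], M[len(T)-1::-1]):
--             x = (x * _m + t) % m
--             c = c * _m  % m
--         T.append((b - x) * modinv(c, m) % m)
--     return T
-- ===== SOURCE B (Python) =====
-- def modinv(a, m):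
--     b, u, v = m, 1, 0
--     while b:
--         a, b, u, v = b, a - a // b * b, v, u - a // b * v
--     return u % m
--
-- def garner(B, M):
--     # Single pass: carry the exact partial CRT value V and modulus product P
--     # as plain (big) integers, so no inner re-scan of earlier residues is needed.
--     T = []
--     V, P = 0, 1
--     for b, m in zip(B, M):
--         t = (b - V) * modinv(P % m, m) % m
--         T.append(t)
--         V += t * P
--         P *= m
--     return T
-- ===== Notes on version B (the rewrite author's own statement) =====
-- stated objective: faster
-- what changed: B drops A's inner Horner re-scan of the earlier residues: it carries the exact partial CRT value V and the modulus product P as plain big integers across the single pass, computing each coefficient as (b-V)*modinv(P%m,m)%m.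
import Mathlib
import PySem

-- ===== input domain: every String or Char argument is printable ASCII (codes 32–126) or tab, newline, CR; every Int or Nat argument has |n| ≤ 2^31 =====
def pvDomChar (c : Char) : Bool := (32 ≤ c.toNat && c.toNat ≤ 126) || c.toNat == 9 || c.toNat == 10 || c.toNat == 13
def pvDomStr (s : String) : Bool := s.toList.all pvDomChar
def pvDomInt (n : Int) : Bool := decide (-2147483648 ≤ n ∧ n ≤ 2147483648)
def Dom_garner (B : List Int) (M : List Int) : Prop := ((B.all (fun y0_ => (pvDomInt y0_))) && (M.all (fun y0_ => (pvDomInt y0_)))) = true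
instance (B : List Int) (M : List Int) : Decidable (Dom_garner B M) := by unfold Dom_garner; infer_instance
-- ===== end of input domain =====

-- B replaces A's inner Horner re-scan of earlier residues by carrying the exact
-- partial CRT value and modulus product across one pass (fewer interpreted steps).

-- ===== PORT A =====

-- termination helper for the extended-Euclid loop: the new b is Python's a % b
theorem pymod_natAbs_lt (a b : Int) (hb : b ≠ 0) :
    (a - PySem.Int.floordiv a b * b).natAbs < b.natAbs := by
  have key : a - PySem.Int.floordiv a b * b = PySem.Int.mod a b := by
    have h := PySem.Int.floordiv_mul_add_mod a b; linarith
  rw [key]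
  rcases lt_or_gt_of_ne hb with hneg | hpos
  · have h1 := PySem.Int.mod_neg_bounds a hneg; omega
  · have h1 := PySem.Int.mod_nonneg a hpos; have h2 := PySem.Int.mod_lt a hpos; omega

-- while b: a, b, u, v = b, a - a // b * b, v, u - a // b * v
def modinvLoop (a b u v : Int) : Int :=
  if hb : b = 0 then u
  else modinvLoop b (a - PySem.Int.floordiv a b * b) v (u - PySem.Int.floordiv a b * v)
termination_by b.natAbs
decreasing_by exact pymod_natAbs_lt a b hb

def modinv (a m : Int) : Int := PySem.Int.mod (modinvLoop a m 1 0) m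

-- the inner 'for t, _m in zip(T[::-1], M[len(T)-1::-1])' loop body over its pairs
def garnerInner (m : Int) (zs : List (Int × Int)) : Int × Int :=
  zs.foldl (fun xc tm =>
    (PySem.Int.mod (xc.1 * tm.2 + tm.1) m, PySem.Int.mod (xc.2 * tm.2) m)) (0, 1)

def garnerLoop : List (Int × Int) → List Int → List Int → List Int
  | [], _, T => T
  | (b, m) :: rest, M, T =>
    let zs := ((PySem.List.slice? T none none (-1)).getD []).zip
              ((PySem.List.slice? M (some ((T.length : Int) - 1)) none (-1)).getD [])
    let xc := garnerInner m zs
    garnerLoop rest M (T ++ [PySem.Int.mod ((b - xc.1) * modinv xc.2 m) m])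

def garner (B : List Int) (M : List Int) : List Int := garnerLoop (B.zip M) M []

-- ===== PORT B =====

def garnerAltLoop : List (Int × Int) → List Int → Int → Int → List Int
  | [], T, _, _ => T
  | (b, m) :: rest, T, V, P =>
    let t := PySem.Int.mod ((b - V) * modinv (PySem.Int.mod P m) m) m
    garnerAltLoop rest (T ++ [t]) (V + t * P) (P * m)

def garner_alt (B : List Int) (M : List Int) : List Int := garnerAltLoop (B.zip M) [] 0 1

-- ===== PRECONDITION & SPEC =====
-- Pre_ excludes a zero modulus among the zipped pairs: there Python's '%' raises ZeroDivisionError.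
def Pre_garner (B : List Int) (M : List Int) : Prop := ∀ p ∈ B.zip M, p.2 ≠ 0
instance (B : List Int) (M : List Int) : Decidable (Pre_garner B M) := by unfold Pre_garner; infer_instance

def pvWitness_garner : List Int × List Int := ([2, 3], [5, 7])

def Spec_garner (B : List Int) (M : List Int) (out : List Int) : Prop := out = garner_alt B M
instance (B : List Int) (M : List Int) (out : List Int) : Decidable (Spec_garner B M out) := by unfold Spec_garner; infer_instance

-- ===== CLAIM (what is proved, stated in full; the proofs are below) =====
def Claim_equal_garner : Prop := ∀ (B : List Int) (M : List Int), Dom_garner B M → Pre_garner B M → Spec_garner B M (garner B M)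

-- ===== LEMMAS AND PROOFS =====

-- exact (un-reduced) mixed-radix value and modulus product of a list of (residue, modulus) pairs
def Sz : List (Int × Int) → Int
  | [] => 0
  | (t, mm) :: Z => t + mm * Sz Z

def Pz : List (Int × Int) → Int
  | [] => 1
  | (_, mm) :: Z => mm * Pz Z

theorem Sz_snoc (Z : List (Int × Int)) (t mm : Int) :
    Sz (Z ++ [(t, mm)]) = Sz Z + Pz Z * t := by
  induction Z with
  | nil => simp [Sz, Pz]
  | cons hd tl ih => cases hd; simp [Sz, Pz, ih]; ring

theorem Pz_snoc (Z : List (Int × Int)) (t mm : Int) :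
    Pz (Z ++ [(t, mm)]) = Pz Z * mm := by
  induction Z with
  | nil => simp [Pz]
  | cons hd tl ih => cases hd; simp [Pz, ih]; ring

theorem pymod_sub_dvd (a b : Int) : b ∣ PySem.Int.mod a b - a :=
  ⟨-PySem.Int.floordiv a b, by
    have h := PySem.Int.floordiv_mul_add_mod a b; linear_combination h⟩

theorem pymod_congr {b : Int} (hb : b ≠ 0) {x y : Int} (h : b ∣ x - y) :
    PySem.Int.mod x b = PySem.Int.mod y b := by
  obtain ⟨k1, h1⟩ := pymod_sub_dvd x b
  obtain ⟨k2, h2⟩ := pymod_sub_dvd y b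
  obtain ⟨k, hk⟩ := h
  have hdvd : b ∣ PySem.Int.mod x b - PySem.Int.mod y b :=
    ⟨k1 + k - k2, by linear_combination h1 - h2 + hk⟩
  have hz : PySem.Int.mod x b - PySem.Int.mod y b = 0 := by
    apply Int.eq_zero_of_dvd_of_natAbs_lt_natAbs hdvd
    rcases lt_or_gt_of_ne hb with hneg | hpos
    · have b1 := PySem.Int.mod_neg_bounds x hneg; have b2 := PySem.Int.mod_neg_bounds y hneg; omega
    · have b1 := PySem.Int.mod_nonneg x hpos; have b2 := PySem.Int.mod_lt x hpos
      have b3 := PySem.Int.mod_nonneg y hpos; have b4 := PySem.Int.mod_lt y hpos; omega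
  omega

theorem pymod_eq_dvd {b x y : Int} (h : PySem.Int.mod x b = PySem.Int.mod y b) :
    b ∣ x - y := by
  obtain ⟨k1, h1⟩ := pymod_sub_dvd x b
  obtain ⟨k2, h2⟩ := pymod_sub_dvd y b
  exact ⟨k2 - k1, by linear_combination -h1 + h2 + h⟩

theorem pymod_pymod (a b : Int) :
    PySem.Int.mod (PySem.Int.mod a b) b = PySem.Int.mod a b := by
  simpa [PySem.Int.mod] using Int.fmod_fmod_of_dvd a (dvd_refl b)

theorem modinv_pymod {m : Int} (hm : m ≠ 0) (a : Int) :
    modinv (PySem.Int.mod a m) m = modinv a m := by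
  have key : ∀ x : Int, x - PySem.Int.floordiv x m * m = PySem.Int.mod x m := fun x => by
    have h := PySem.Int.floordiv_mul_add_mod x m; linarith
  unfold modinv
  rw [modinvLoop, dif_neg hm]
  conv_rhs => rw [modinvLoop]
  rw [dif_neg hm]
  simp only [mul_zero, sub_zero]
  rw [key, key, pymod_pymod]

theorem innerA_spec {m : Int} (hm : m ≠ 0) (Z : List (Int × Int)) :
    (garnerInner m Z.reverse).1 = PySem.Int.mod (Sz Z) m ∧
      PySem.Int.mod (garnerInner m Z.reverse).2 m = PySem.Int.mod (Pz Z) m := by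
  induction Z with
  | nil => simp [garnerInner, Sz, Pz, PySem.Int.mod]
  | cons hd tl ih =>
    obtain ⟨t, mm⟩ := hd
    obtain ⟨ih1, ih2⟩ := ih
    have hstep : garnerInner m ((t, mm) :: tl).reverse =
        (PySem.Int.mod ((garnerInner m tl.reverse).1 * mm + t) m,
         PySem.Int.mod ((garnerInner m tl.reverse).2 * mm) m) := by
      simp [garnerInner, List.foldl_append]
    rw [hstep]
    constructor
    · rw [ih1]
      obtain ⟨k, hk⟩ := pymod_sub_dvd (Sz tl) m
      exact pymod_congr hm ⟨k * mm, by simp [Sz]; linear_combination mm * hk⟩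
    · rw [pymod_pymod]
      obtain ⟨k, hk⟩ := pymod_eq_dvd ih2
      exact pymod_congr hm ⟨k * mm, by simp [Pz]; linear_combination mm * hk⟩

theorem filterMap_congr_some {α β : Type} (f : α → Option β) (g : α → β) :
    ∀ (l : List α), (∀ a ∈ l, f a = some (g a)) → l.filterMap f = l.map g
  | [], _ => rfl
  | a :: l, h => by
    simp [h a (by simp), filterMap_congr_some f g l (fun x hx => h x (by simp [hx]))]

theorem map_range_rev (M : List Int) (k : Nat) (h : k ≤ M.length) :
    (List.range k).map (fun j => M.getD (k - 1 - j) 0) = (M.take k).reverse := by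
  apply List.ext_getElem
  · simp [min_eq_left h]
  · intro i h1 h2
    simp only [List.getElem_map, List.getElem_range, List.getElem_reverse, List.getElem_take]
    have hlen : (M.take k).length = k := by simp [min_eq_left h]
    have hi : i < k := by simpa [hlen] using h2
    rw [List.getD_eq_getElem M 0 (by omega : k - 1 - i < M.length)]
    congr 1 <;> omega

theorem zip_reverse_eq : ∀ (l1 l2 : List Int), l1.length = l2.length →
    l1.reverse.zip l2.reverse = (l1.zip l2).reverse
  | [], l2, h => by
    have h2 : l2 = [] := by cases l2 <;> simp_all
    subst h2; rfl
  | a :: l1, [], h => by simp at h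
  | a :: l1, b :: l2, h => by
    have hlen : l1.length = l2.length := by simpa using h
    simp only [List.reverse_cons, List.zip_cons_cons]
    rw [List.zip_append (by simp [hlen]), zip_reverse_eq l1 l2 hlen]
    simp

theorem map_snd_zip_take : ∀ (B M : List Int), M.take (B.zip M).length = (B.zip M).map Prod.snd
  | [], _ => by simp
  | _ :: _, [] => by simp
  | b :: B, m :: M => by
    simp only [List.zip_cons_cons, List.length_cons, List.take_succ_cons, List.map_cons,
      List.cons.injEq]
    exact ⟨trivial, map_snd_zip_take B M⟩

theorem slice_rev_prefix (M : List Int) (k : Nat) (h1 : 1 ≤ k) (h2 : k ≤ M.length) :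
    PySem.List.slice? M (some ((k : Int) - 1)) none (-1) = some ((M.take k).reverse) := by
  unfold PySem.List.slice? PySem.List.sliceIndices
  have hk0 : ¬ ((k : Int) - 1 < 0) := by omega
  have hmin : min ((k : Int) - 1) ((M.length : Int) - 1) = (k : Int) - 1 := by omega
  norm_num [hk0, hmin]
  rw [if_pos (by omega : 0 < k), ← map_range_rev M k h2]
  apply filterMap_congr_some
  intro j hj
  have hjk : j < k := by simpa using hj
  have hidx : ((k : Int) - 1 + -(j : Int)).toNat = k - 1 - j := by omega
  rw [hidx, List.getElem?_eq_getElem (by omega), List.getD_eq_getElem M 0 (by omega)]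

theorem zip_slices (T M : List Int) (h : T.length ≤ M.length) :
    (((PySem.List.slice? T none none (-1)).getD []).zip
      ((PySem.List.slice? M (some ((T.length : Int) - 1)) none (-1)).getD []))
    = (T.zip (M.take T.length)).reverse := by
  rw [PySem.List.slice?_none_none_neg_one]
  rcases T with _ | ⟨t0, T'⟩
  · simp
  · have h' : T'.length + 1 ≤ M.length := by simpa using h
    rw [slice_rev_prefix M (t0 :: T').length (by simp) h]
    simp only [Option.getD_some]
    apply zip_reverse_eq
    simp only [List.length_take, List.length_cons]
    omega

theorem loop_eq : ∀ (pairs : List (Int × Int)) (M T : List Int) (V P : Int),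
    T.length + pairs.length ≤ M.length →
    (M.drop T.length).take pairs.length = pairs.map Prod.snd →
    (∀ p ∈ pairs, p.2 ≠ 0) →
    V = Sz (T.zip (M.take T.length)) →
    P = Pz (T.zip (M.take T.length)) →
    garnerLoop pairs M T = garnerAltLoop pairs T V P
  | [], M, T, V, P, _, _, _, _, _ => by simp [garnerLoop, garnerAltLoop]
  | (b, m) :: rest, M, T, V, P, hlen, htake, hz, hV, hP => by
    have hm : m ≠ 0 := hz (b, m) (by simp)
    have hTM : T.length < M.length := by simp at hlen; omega
    have hdropc : M.drop T.length = M[T.length] :: M.drop (T.length + 1) :=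
      List.drop_eq_getElem_cons hTM
    have hhead : M[T.length] = m ∧ (M.drop (T.length + 1)).take rest.length = rest.map Prod.snd := by
      rw [hdropc] at htake
      simp only [List.map_cons, List.length_cons, List.take_succ_cons, List.cons.injEq] at htake
      exact htake
    have hzlen : T.length = (M.take T.length).length := by simp [min_eq_left (le_of_lt hTM)]
    have hZ := zip_slices T M (le_of_lt hTM)
    obtain ⟨hx, hc⟩ := innerA_spec hm (T.zip (M.take T.length))
    -- the value appended by A equals the value appended by B
    have hval : PySem.Int.mod ((b - (garnerInner m ((T.zip (M.take T.length)).reverse)).1) *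
          modinv (garnerInner m ((T.zip (M.take T.length)).reverse)).2 m) m =
        PySem.Int.mod ((b - V) * modinv (PySem.Int.mod P m) m) m := by
      rw [hx, ← modinv_pymod hm, hc, hV, hP]
      obtain ⟨k, hk⟩ := pymod_sub_dvd (Sz (T.zip (M.take T.length))) m
      exact pymod_congr hm ⟨-k * modinv (PySem.Int.mod (Pz (T.zip (M.take T.length))) m) m,
        by linear_combination (-(modinv (PySem.Int.mod (Pz (T.zip (M.take T.length))) m) m)) * hk⟩
    have htakes : M.take (T.length + 1) = M.take T.length ++ [m] := by
      rw [← hhead.1]; rw [List.take_add_one, List.getElem?_eq_getElem hTM]; simp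
    have hzip' : (T ++ [PySem.Int.mod ((b - V) * modinv (PySem.Int.mod P m) m) m]).zip
          (M.take (T.length + 1)) =
        (T.zip (M.take T.length)) ++
          [(PySem.Int.mod ((b - V) * modinv (PySem.Int.mod P m) m) m, m)] := by
      rw [htakes, List.zip_append hzlen]; rfl
    show garnerLoop ((b, m) :: rest) M T = garnerAltLoop ((b, m) :: rest) T V P
    rw [garnerLoop, garnerAltLoop]
    simp only [hZ, hval]
    apply loop_eq rest M _ _ _
    · simp at hlen ⊢; omega
    · simpa using hhead.2
    · exact fun p hp => hz p (by simp [hp])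
    · rw [List.length_append, List.length_singleton, hzip', Sz_snoc, hV, hP]; ring
    · rw [List.length_append, List.length_singleton, hzip', Pz_snoc, hP]

-- ===== VERDICT (by name: the statement is the Claim_ definition above) =====
theorem garner_spec : Claim_equal_garner := by
  intro B M _ hpre
  unfold Spec_garner garner garner_alt
  apply loop_eq (B.zip M) M [] 0 1
  · simp
  · simpa using map_snd_zip_take B M
  · exact hpre
  · simp [Sz]
  · simp [Pz]
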